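-- pv_equiv track=rewrite | github.com/akuangsaechao/CS185C | script.py | calculateY
-- ===== SOURCE A (Python) =====
-- def calculateY(X):
--     Y = []
--     for index, x in enumerate(X):
--         if x[0] < 125:
--             if x[1] >= 1500:
--                 Y.append('HIGH')
--             elif x[1] >= 1000 and x[1] < 1500:
--                 Y.append('MEDIUM HIGH')
--             elif x[1] >= 500 and x[1] < 1000:
--                 Y.append('MEDIUM LOW')
--             else:
--                 Y.append('LOW')
--         elif x[0] >= 125 and x[0] < 250:
--             if x[1] >= 1250:
--                 Y.append('HIGH')
--             elif x[1] >= 750 and x[1] < 1250: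
--                 Y.append('MEDIUM HIGH')
--             elif x[1] >= 250 and x[1] < 750:
--                 Y.append('MEDIUM LOW')
--             else:
--                 Y.append('LOW')
--         elif x[0] >= 375 and x[0] < 500:
--             if x[1] >= 1000:
--                 Y.append('HIGH')
--             elif x[1] >= 500 and x[1] < 1000:
--                 Y.append('MEDIUM HIGH')
--             elif x[1] >= 100 and x[1] < 500:
--                 Y.append('MEDIUM LOW')
--             else:
--                 Y.append('LOW')
--         else:
--             if x[1] >= 750:
--                 Y.append('HIGH')
--             elif x[1] >= 500 and x[1] < 750:
--                 Y.append('MEDIUM HIGH')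
--             elif x[1] >= 250 and x[1] < 500:
--                 Y.append('MEDIUM LOW')
--             else:
--                 Y.append('LOW')
--
--     return Y
-- ===== SOURCE B (Python) =====
-- def _row(x0):
--     if x0 < 125:
--         return (1500, 1000, 500)
--     if x0 < 250:
--         return (1250, 750, 250)
--     if 375 <= x0 < 500:
--         return (1000, 500, 100)
--     return (750, 500, 250)
--
-- _NAMES = ('LOW', 'MEDIUM LOW', 'MEDIUM HIGH', 'HIGH')
--
-- def calculateY(X):
--     # score accumulation: three staged passes, each adding 1 where that
--     # level's threshold is met; score = label index (thresholds descend).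
--     scores = [0] * len(X)
--     for level in range(3):
--         for i, x in enumerate(X):
--             if x[1] >= _row(x[0])[level]:
--                 scores[i] += 1
--     return [_NAMES[s] for s in scores]
-- ===== Notes on version B (the rewrite author's own statement) =====
-- stated objective: alternative
-- what changed: Replaces the per-element twelve-branch first-match decision with score accumulation: three staged passes over the whole list, each incrementing an integer score where that severity level's threshold is met, then a final map from score to label by index (correct because each band's thresholds are descending, so the count of met thresholds equals the label rank).
import Mathlib
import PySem

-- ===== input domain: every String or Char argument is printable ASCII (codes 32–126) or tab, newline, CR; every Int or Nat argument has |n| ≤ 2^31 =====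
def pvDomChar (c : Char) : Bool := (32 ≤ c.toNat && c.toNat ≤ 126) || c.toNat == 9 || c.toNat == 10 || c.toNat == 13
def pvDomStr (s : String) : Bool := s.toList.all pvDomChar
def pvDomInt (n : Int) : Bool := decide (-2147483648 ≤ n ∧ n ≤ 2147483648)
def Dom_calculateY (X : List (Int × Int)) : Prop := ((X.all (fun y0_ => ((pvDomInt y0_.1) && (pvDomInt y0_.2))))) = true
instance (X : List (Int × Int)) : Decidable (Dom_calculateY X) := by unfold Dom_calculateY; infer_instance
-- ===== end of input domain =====

-- B replaces A's per-element twelve-branch decision with three staged score-accumulation passes plus an index-to-label map (objective: alternative).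


-- ===== PORT A =====
-- literal transliteration of A's nested branches; Y built by foldl append over X
def calculateY (X : List (Int × Int)) : List String :=
  X.foldl (fun Y x =>
    if x.1 < 125 then
      if x.2 ≥ 1500 then Y ++ ["HIGH"]
      else if x.2 ≥ 1000 ∧ x.2 < 1500 then Y ++ ["MEDIUM HIGH"]
      else if x.2 ≥ 500 ∧ x.2 < 1000 then Y ++ ["MEDIUM LOW"]
      else Y ++ ["LOW"]
    else if x.1 ≥ 125 ∧ x.1 < 250 then
      if x.2 ≥ 1250 then Y ++ ["HIGH"]
      else if x.2 ≥ 750 ∧ x.2 < 1250 then Y ++ ["MEDIUM HIGH"]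
      else if x.2 ≥ 250 ∧ x.2 < 750 then Y ++ ["MEDIUM LOW"]
      else Y ++ ["LOW"]
    else if x.1 ≥ 375 ∧ x.1 < 500 then
      if x.2 ≥ 1000 then Y ++ ["HIGH"]
      else if x.2 ≥ 500 ∧ x.2 < 1000 then Y ++ ["MEDIUM HIGH"]
      else if x.2 ≥ 100 ∧ x.2 < 500 then Y ++ ["MEDIUM LOW"]
      else Y ++ ["LOW"]
    else
      if x.2 ≥ 750 then Y ++ ["HIGH"]
      else if x.2 ≥ 500 ∧ x.2 < 750 then Y ++ ["MEDIUM HIGH"]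
      else if x.2 ≥ 250 ∧ x.2 < 500 then Y ++ ["MEDIUM LOW"]
      else Y ++ ["LOW"]) []

-- ===== PORT B =====
-- per-band threshold row (Source B's _row)
def pvRow (x0 : Int) : Int × Int × Int :=
  if x0 < 125 then (1500, 1000, 500)
  else if x0 < 250 then (1250, 750, 250)
  else if 375 ≤ x0 ∧ x0 < 500 then (1000, 500, 100)
  else (750, 500, 250)

-- tuple indexing _row(x0)[level]; level is always 0, 1 or 2 here
def pvRowGet (ts : Int × Int × Int) : Nat → Int
  | 0 => ts.1
  | 1 => ts.2.1
  | _ => ts.2.2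

-- _NAMES[s]; the scores fed in are always 0..3 (exact there)
def pvName (s : Int) : String :=
  if s ≤ 0 then "LOW" else if s = 1 then "MEDIUM LOW"
  else if s = 2 then "MEDIUM HIGH" else "HIGH"

-- one staged pass: scores[i] += 1 where X[i] meets this level's threshold
def pvPass (X : List (Int × Int)) (level : Nat) (scores : List Int) : List Int :=
  List.zipWith (fun s x => if x.2 ≥ pvRowGet (pvRow x.1) level then s + 1 else s) scores X

def calculateY_alt (X : List (Int × Int)) : List String :=
  let scores := ([0, 1, 2] : List Nat).foldl (fun sc level => pvPass X level sc)
                  (List.replicate X.length (0 : Int))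
  scores.map pvName

-- ===== PRECONDITION & SPEC =====
def Spec_calculateY (X : List (Int × Int)) (out : List String) : Prop := out = calculateY_alt X
instance (X : List (Int × Int)) (out : List String) : Decidable (Spec_calculateY X out) := by unfold Spec_calculateY; infer_instance

-- ===== CLAIM (what is proved, stated in full; the proofs are below) =====
def Claim_equal_calculateY : Prop := ∀ (X : List (Int × Int)), Dom_calculateY X → Spec_calculateY X (calculateY X)

-- ===== LEMMAS AND PROOFS =====
-- A's per-element label, extracted for the proof
def pvLabelA (x : Int × Int) : String :=
  if x.1 < 125 then
    if x.2 ≥ 1500 then "HIGH"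
    else if x.2 ≥ 1000 ∧ x.2 < 1500 then "MEDIUM HIGH"
    else if x.2 ≥ 500 ∧ x.2 < 1000 then "MEDIUM LOW"
    else "LOW"
  else if x.1 ≥ 125 ∧ x.1 < 250 then
    if x.2 ≥ 1250 then "HIGH"
    else if x.2 ≥ 750 ∧ x.2 < 1250 then "MEDIUM HIGH"
    else if x.2 ≥ 250 ∧ x.2 < 750 then "MEDIUM LOW"
    else "LOW"
  else if x.1 ≥ 375 ∧ x.1 < 500 then
    if x.2 ≥ 1000 then "HIGH"
    else if x.2 ≥ 500 ∧ x.2 < 1000 then "MEDIUM HIGH"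
    else if x.2 ≥ 100 ∧ x.2 < 500 then "MEDIUM LOW"
    else "LOW"
  else
    if x.2 ≥ 750 then "HIGH"
    else if x.2 ≥ 500 ∧ x.2 < 750 then "MEDIUM HIGH"
    else if x.2 ≥ 250 ∧ x.2 < 500 then "MEDIUM LOW"
    else "LOW"

theorem calculateY_eq_map (X : List (Int × Int)) (Y : List String) :
    X.foldl (fun Y x =>
      if x.1 < 125 then
        if x.2 ≥ 1500 then Y ++ ["HIGH"]
        else if x.2 ≥ 1000 ∧ x.2 < 1500 then Y ++ ["MEDIUM HIGH"]
        else if x.2 ≥ 500 ∧ x.2 < 1000 then Y ++ ["MEDIUM LOW"]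
        else Y ++ ["LOW"]
      else if x.1 ≥ 125 ∧ x.1 < 250 then
        if x.2 ≥ 1250 then Y ++ ["HIGH"]
        else if x.2 ≥ 750 ∧ x.2 < 1250 then Y ++ ["MEDIUM HIGH"]
        else if x.2 ≥ 250 ∧ x.2 < 750 then Y ++ ["MEDIUM LOW"]
        else Y ++ ["LOW"]
      else if x.1 ≥ 375 ∧ x.1 < 500 then
        if x.2 ≥ 1000 then Y ++ ["HIGH"]
        else if x.2 ≥ 500 ∧ x.2 < 1000 then Y ++ ["MEDIUM HIGH"]
        else if x.2 ≥ 100 ∧ x.2 < 500 then Y ++ ["MEDIUM LOW"]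
        else Y ++ ["LOW"]
      else
        if x.2 ≥ 750 then Y ++ ["HIGH"]
        else if x.2 ≥ 500 ∧ x.2 < 750 then Y ++ ["MEDIUM HIGH"]
        else if x.2 ≥ 250 ∧ x.2 < 500 then Y ++ ["MEDIUM LOW"]
        else Y ++ ["LOW"]) Y = Y ++ X.map pvLabelA := by
  induction X generalizing Y with
  | nil => simp
  | cons h t ih =>
    rw [List.foldl_cons, List.map_cons]
    have hstep : ∀ (Y : List String),
        (if h.1 < 125 then
          if h.2 ≥ 1500 then Y ++ ["HIGH"]
          else if h.2 ≥ 1000 ∧ h.2 < 1500 then Y ++ ["MEDIUM HIGH"]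
          else if h.2 ≥ 500 ∧ h.2 < 1000 then Y ++ ["MEDIUM LOW"]
          else Y ++ ["LOW"]
        else if h.1 ≥ 125 ∧ h.1 < 250 then
          if h.2 ≥ 1250 then Y ++ ["HIGH"]
          else if h.2 ≥ 750 ∧ h.2 < 1250 then Y ++ ["MEDIUM HIGH"]
          else if h.2 ≥ 250 ∧ h.2 < 750 then Y ++ ["MEDIUM LOW"]
          else Y ++ ["LOW"]
        else if h.1 ≥ 375 ∧ h.1 < 500 then
          if h.2 ≥ 1000 then Y ++ ["HIGH"]
          else if h.2 ≥ 500 ∧ h.2 < 1000 then Y ++ ["MEDIUM HIGH"]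
          else if h.2 ≥ 100 ∧ h.2 < 500 then Y ++ ["MEDIUM LOW"]
          else Y ++ ["LOW"]
        else
          if h.2 ≥ 750 then Y ++ ["HIGH"]
          else if h.2 ≥ 500 ∧ h.2 < 750 then Y ++ ["MEDIUM HIGH"]
          else if h.2 ≥ 250 ∧ h.2 < 500 then Y ++ ["MEDIUM LOW"]
          else Y ++ ["LOW"]) = Y ++ [pvLabelA h] := by
      intro Y; unfold pvLabelA; split_ifs <;> rfl
    rw [hstep, ih, List.append_assoc]; rfl

-- B's per-element score as a closed term
def pvScore (x : Int × Int) : Int :=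
  ((if x.2 ≥ pvRowGet (pvRow x.1) 0 then (1:Int) else 0)
   + (if x.2 ≥ pvRowGet (pvRow x.1) 1 then 1 else 0))
   + (if x.2 ≥ pvRowGet (pvRow x.1) 2 then 1 else 0)

theorem zipWith_map_self {α β : Type} (f : β → α → β) (g : α → β) (X : List α) :
    List.zipWith f (X.map g) X = X.map (fun x => f (g x) x) := by
  induction X with
  | nil => rfl
  | cons h t ih => simp [ih]

theorem alt_eq_map (X : List (Int × Int)) :
    calculateY_alt X = X.map (fun x => pvName (pvScore x)) := by
  unfold calculateY_alt
  have h0 : List.replicate X.length (0 : Int) = X.map (fun _ => (0 : Int)) := by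
    simp [List.map_const']
  simp only [List.foldl_cons, List.foldl_nil, h0, pvPass, zipWith_map_self, List.map_map]
  refine List.map_congr_left fun x _ => ?_
  simp only [Function.comp]
  congr 1
  simp only [pvScore]
  split_ifs <;> omega

set_option maxHeartbeats 1000000 in
theorem label_eq (x : Int × Int) : pvLabelA x = pvName (pvScore x) := by
  obtain ⟨a, b⟩ := x
  simp only [pvLabelA, pvScore, pvRow, pvRowGet, pvName]
  split_ifs <;> first | rfl | (dsimp only at *; omega)

-- ===== VERDICT (by name: the statement is the Claim_ definition above) =====
theorem calculateY_spec : Claim_equal_calculateY := by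
  intro X _
  unfold Spec_calculateY calculateY
  rw [calculateY_eq_map X [], alt_eq_map, List.nil_append]
  exact List.map_congr_left fun x _ => label_eq x
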